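-- pv_equiv track=rewrite | github.com/BenjaminXiang/MiroThinker | apps/miroflow-agent/src/data_agents/professor/profile.py | _normalize_email_text
-- ===== SOURCE A (Python) =====
-- def _normalize_email_text(text: str) -> str:
--     normalized = text
--     replacements = (
--         ("_AT_", "@"),
--         ("(at)", "@"),
--         ("[at]", "@"),
--         ("{at}", "@"),
--     )
--     for old, new in replacements:
--         normalized = normalized.replace(old, new)
--         normalized = normalized.replace(old.upper(), new)
--     return normalized.replace(" ", "")
-- ===== SOURCE B (Python) =====
-- def _normalize_email_text(text: str) -> str:
--     # One left-to-right pass: collapse any of the seven obfuscation tokens to '@'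
--     # and drop spaces in the same sweep, instead of nine full .replace() passes.
--     pats = ("_AT_", "(at)", "(AT)", "[at]", "[AT]", "{at}", "{AT}")
--     out = []
--     i = 0
--     n = len(text)
--     while i < n:
--         if text[i] in "_([{" and text[i:i + 4] in pats:
--             out.append("@")
--             i += 4
--         else:
--             c = text[i]
--             if c != " ":
--                 out.append(c)
--             i += 1
--     return "".join(out)
-- ===== Notes on version B (the rewrite author's own statement) =====
-- stated objective: alternative
-- what changed: Replaced nine sequential whole-string .replace() passes with a single left-to-right scan that collapses each of the seven obfuscation tokens and strips blanks in the same sweep; correctness rests on the tokens being pairwise non-overlapping and never containing the replacement character or a blank.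
import Mathlib
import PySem

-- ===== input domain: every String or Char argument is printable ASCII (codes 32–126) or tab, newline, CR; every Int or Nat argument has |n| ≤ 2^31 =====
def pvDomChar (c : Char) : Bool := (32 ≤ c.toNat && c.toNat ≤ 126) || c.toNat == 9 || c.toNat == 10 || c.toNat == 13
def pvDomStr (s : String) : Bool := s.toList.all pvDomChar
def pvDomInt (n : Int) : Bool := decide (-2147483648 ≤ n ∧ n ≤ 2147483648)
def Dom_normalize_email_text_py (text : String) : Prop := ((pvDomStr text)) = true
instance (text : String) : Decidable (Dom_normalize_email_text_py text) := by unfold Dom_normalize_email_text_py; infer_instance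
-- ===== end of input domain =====

-- B replaces A's nine sequential whole-string .replace() passes by ONE left-to-right scan
-- that collapses each of the seven obfuscation tokens and strips blanks in the same sweep
-- (objective: alternative single-pass algorithm; no speed claim).

-- ===== PORT A =====
def normalize_email_text_py (text : String) : String :=
  let replacements : List (String × String) :=
    [("_AT_", "@"), ("(at)", "@"), ("[at]", "@"), ("{at}", "@")]
  let normalized := replacements.foldl
    (fun normalized p =>
      let n1 := PySem.Str.replace normalized p.1 p.2
      PySem.Str.replace n1 (PySem.Str.upper p.1) p.2) text
  PySem.Str.replace normalized " " ""

-- ===== PORT B =====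
-- the tuple 'pats' of Source B
def pvPats : List (List Char) :=
  [['_','A','T','_'], ['(','a','t',')'], ['(','A','T',')'],
   ['[','a','t',']'], ['[','A','T',']'], ['{','a','t','}'], ['{','A','T','}']]

-- Source B's while-loop: one pass; 'text[i] in "_([{"' then 'text[i:i+4] in pats'
def pvScan (l : List Char) : List Char :=
  match l with
  | [] => []
  | c :: t =>
    if c ∈ ['_','(','[','{'] ∧ (c :: t).take 4 ∈ pvPats then
      '@' :: pvScan ((c :: t).drop 4)
    else if c = ' ' then pvScan t else c :: pvScan t
termination_by l.length
decreasing_by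
  all_goals simp

def normalize_email_text_py_alt (text : String) : String :=
  String.ofList (pvScan text.toList)

-- ===== PRECONDITION & SPEC =====
def Spec_normalize_email_text_py (text : String) (out : String) : Prop := out = normalize_email_text_py_alt text
instance (text : String) (out : String) : Decidable (Spec_normalize_email_text_py text out) := by unfold Spec_normalize_email_text_py; infer_instance

-- ===== CLAIM (what is proved, stated in full; the proofs are below) =====
def Claim_equal_normalize_email_text_py : Prop := ∀ (text : String), Dom_normalize_email_text_py text → Spec_normalize_email_text_py text (normalize_email_text_py text)

-- ===== LEMMAS AND PROOFS =====

-- A structural model of Python's str.replace(old, new) (old nonempty): leftmost scanner.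
def pvR (p new l : List Char) : List Char :=
  match l with
  | [] => []
  | c :: t =>
    if p ≠ [] ∧ p <+: (c :: t) then
      new ++ pvR p new ((c :: t).drop p.length)
    else c :: pvR p new t
termination_by l.length
decreasing_by
  · rename_i h; simp; cases p with
    | nil => exact absurd rfl h.1
    | cons a b => simp
  · simp

theorem pvR_nil (p new : List Char) : pvR p new [] = [] := by simp [pvR]

theorem pvR_pos (p new : List Char) (c : Char) (t : List Char)
    (hp : p ≠ []) (hpre : p <+: (c :: t)) :
    pvR p new (c :: t) = new ++ pvR p new ((c :: t).drop p.length) := by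
  rw [pvR]; simp [hp, hpre]

theorem pvR_neg (p new : List Char) (c : Char) (t : List Char)
    (hpre : ¬ p <+: (c :: t)) :
    pvR p new (c :: t) = c :: pvR p new t := by
  rw [pvR]; simp [hpre]

-- the fueled scanner of PySem.Chars.replace equals pvR for nonempty pattern
theorem pvGo_eq (p new : List Char) (fuel : Nat) :
    ∀ (l acc : List Char), l.length ≤ fuel → p ≠ [] →
      PySem.Chars.replace.go p new fuel l acc = acc.reverse ++ pvR p new l := by
  induction fuel with
  | zero =>
    intro l acc hl hp
    have : l = [] := List.eq_nil_of_length_eq_zero (Nat.le_zero.mp hl)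
    subst this
    rw [PySem.Chars.replace.go]
    simp [pvR_nil]
  | succ n ih =>
    intro l acc hl hp
    cases l with
    | nil =>
      rw [PySem.Chars.replace.go]
      simp [pvR_nil]
      omega
    | cons c t =>
      rw [PySem.Chars.replace.go]
      by_cases hpre : p <+: (c :: t)
      · have hb : p.isPrefixOf (c :: t) = true := List.isPrefixOf_iff_prefix.mpr hpre
        simp only [hb, if_true]
        have hlen : ((c :: t).drop p.length).length ≤ n := by
          have : 1 ≤ p.length := by
            cases p with
            | nil => exact absurd rfl hp
            | cons a b => simp
          simp at hl ⊢
          omega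
        rw [ih _ _ hlen hp, pvR_pos p new c t hp hpre]
        simp
      · have hb : p.isPrefixOf (c :: t) = false :=
          Bool.eq_false_iff.mpr (fun hc => hpre (List.isPrefixOf_iff_prefix.mp hc))
        simp only [hb, if_false, Bool.false_eq_true]
        have hlen : t.length ≤ n := by simp at hl; omega
        rw [ih _ _ hlen hp, pvR_neg p new c t hpre]
        simp [List.reverse_cons]

theorem pvReplace_eq (s p new : List Char) (hp : p ≠ []) :
    PySem.Chars.replace s p new = pvR p new s := by
  rw [PySem.Chars.replace]
  have : p.isEmpty = false := by simp [hp]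
  simp only [this, Bool.false_eq_true, if_false]
  have := pvGo_eq p new s.length s [] (le_refl _) hp
  simpa using this

-- replacing with "@" never creates a match of a pattern not containing '@' at the front
theorem pvQpref (l : List Char) : ∀ (q p : List Char), '@' ∉ q → ¬ q <+: l →
    ¬ q <+: pvR p ['@'] l := by
  induction l with
  | nil => intro q p _ hq; simpa [pvR_nil] using hq
  | cons c t ih =>
    intro q p hat hq
    rw [pvR]
    split_ifs with h
    · intro hpre
      cases q with
      | nil => exact hq (List.nil_prefix)
      | cons q0 q' =>
        have : q0 = '@' := (List.cons_prefix_cons.mp hpre).1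
        exact hat (by simp [this])
    · intro hpre
      cases q with
      | nil => exact hq (List.nil_prefix)
      | cons q0 q' =>
        obtain ⟨he, hpr⟩ := List.cons_prefix_cons.mp hpre
        have hq' : ¬ q' <+: t := fun hc => hq (by simp [List.cons_prefix_cons, he, hc])
        have hat' : '@' ∉ q' := fun hc => hat (List.mem_cons_of_mem _ hc)
        exact ih q' p hat' hq' hpr

def pvComp (qs : List (List Char)) (l : List Char) : List Char :=
  qs.foldl (fun acc q => pvR q ['@'] acc) l

-- the 8 patterns A replaces, in A's order (old then old.upper() for each pair)
def pvPs8 : List (List Char) :=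
  [['_','A','T','_'], ['_','A','T','_'],
   ['(','a','t',')'], ['(','A','T',')'],
   ['[','a','t',']'], ['[','A','T',']'],
   ['{','a','t','}'], ['{','A','T','}']]

theorem pvComp_nil (qs : List (List Char)) : pvComp qs [] = [] := by
  induction qs with
  | nil => rfl
  | cons q qs ih => simpa [pvComp, pvR_nil] using ih

theorem pvComp_cons_eq (q : List Char) (qs : List (List Char)) (l : List Char) :
    pvComp (q :: qs) l = pvComp qs (pvR q ['@'] l) := rfl

-- a char no remaining pattern matches at is passed through by the whole chain
theorem pvComp_cons (qs : List (List Char)) (c : Char) :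
    ∀ (t : List Char), (∀ q ∈ qs, ¬ q <+: (c :: t)) → (∀ q ∈ qs, '@' ∉ q) →
      pvComp qs (c :: t) = c :: pvComp qs t := by
  induction qs with
  | nil => intro t _ _; rfl
  | cons q qs' ih =>
    intro t hnp hat
    have hq : ¬ q <+: (c :: t) := hnp q (List.mem_cons_self)
    rw [pvComp_cons_eq, pvR_neg _ _ _ _ hq]
    have hnp' : ∀ q' ∈ qs', ¬ q' <+: (c :: pvR q ['@'] t) := by
      intro q' hq' hcon
      have h2 : ¬ q' <+: pvR q ['@'] (c :: t) :=
        pvQpref (c :: t) q' q (hat q' (List.mem_cons_of_mem _ hq'))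
          (hnp q' (List.mem_cons_of_mem _ hq'))
      rw [pvR_neg _ _ _ _ hq] at h2
      exact h2 hcon
    rw [ih (pvR q ['@'] t) hnp' (fun q' h => hat q' (List.mem_cons_of_mem _ h)),
        pvComp_cons_eq]

-- a head occurrence of a pattern of the chain is collapsed to '@' by the whole chain
theorem pvHM (p : List Char) (hp4 : p.length = 4) :
    ∀ qs : List (List Char),
      (∀ q ∈ qs, q.length = 4 ∧ '@' ∉ q ∧
        (q ≠ p → q.head? ≠ p[1]? ∧ q.head? ≠ p[2]? ∧ q.head? ≠ p[3]?)) →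
      p ∈ qs →
      ∀ rest : List Char, pvComp qs (p ++ rest) = '@' :: pvComp qs rest := by
  intro qs
  induction qs with
  | nil => intro _ hmem; cases hmem
  | cons q qs' ih =>
    intro hqs hmem rest
    have hpne : p ≠ [] := by intro h; rw [h] at hp4; simp at hp4
    by_cases hq : q = p
    · subst hq
      have h1 : pvR q ['@'] (q ++ rest) = '@' :: pvR q ['@'] rest := by
        cases q with
        | nil => exact absurd rfl hpne
        | cons a b =>
          have hpre : (a :: b) <+: (a :: (b ++ rest)) := by
            simp [List.cons_prefix_cons]
          have hstep := pvR_pos (a :: b) ['@'] a (b ++ rest) (by simp) hpre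
          have hd : (a :: (b ++ rest)).drop (a :: b).length = rest := by
            rw [show a :: (b ++ rest) = (a :: b) ++ rest from rfl]
            exact List.drop_left
          rw [show (a :: b) ++ rest = a :: (b ++ rest) from rfl, hstep, hd]
          rfl
      rw [pvComp_cons_eq, h1]
      have hcons : pvComp qs' ('@' :: pvR q ['@'] rest) = '@' :: pvComp qs' (pvR q ['@'] rest) := by
        apply pvComp_cons
        · intro q' hq' hcon
          obtain ⟨hl4, hat, _⟩ := hqs q' (List.mem_cons_of_mem _ hq')
          cases q' with
          | nil => simp at hl4
          | cons y ys => exact hat (by simp [(List.cons_prefix_cons.mp hcon).1])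
        · intro q' hq'
          exact (hqs q' (List.mem_cons_of_mem _ hq')).2.1
      rw [hcons, pvComp_cons_eq]
    · -- q ≠ p: q skips over the occurrence of p untouched
      obtain ⟨hlq, hatq, hheads⟩ := hqs q (List.mem_cons_self)
      obtain ⟨h1, h2, h3⟩ := hheads hq
      rcases p with _ | ⟨x0, _ | ⟨x1, _ | ⟨x2, _ | ⟨x3, ptl⟩⟩⟩⟩ <;> simp at hp4
      subst hp4
      cases q with
      | nil => simp at hlq
      | cons y0 q' =>
      simp only [List.head?_cons] at h1 h2 h3
      have hg1 : ([x0,x1,x2,x3] : List Char)[1]? = some x1 := rfl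
      have hg2 : ([x0,x1,x2,x3] : List Char)[2]? = some x2 := rfl
      have hg3 : ([x0,x1,x2,x3] : List Char)[3]? = some x3 := rfl
      rw [hg1] at h1; rw [hg2] at h2; rw [hg3] at h3
      have hy1 : y0 ≠ x1 := by intro h; exact h1 (by rw [h])
      have hy2 : y0 ≠ x2 := by intro h; exact h2 (by rw [h])
      have hy3 : y0 ≠ x3 := by intro h; exact h3 (by rw [h])
      have hne0 : ¬ (y0 :: q') <+: (x0 :: x1 :: x2 :: x3 :: rest) := by
        intro hcon
        obtain ⟨z, hz⟩ := hcon
        have : (y0 :: q') = [x0,x1,x2,x3] := by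
          apply List.append_inj_left (s₁ := y0 :: q') (t₁ := z) (s₂ := [x0,x1,x2,x3]) (t₂ := rest)
          · simpa using hz
          · simp [hlq] at *
        exact hq this
      have hne1 : ¬ (y0 :: q') <+: (x1 :: x2 :: x3 :: rest) := by
        intro hcon; exact hy1 (List.cons_prefix_cons.mp hcon).1
      have hne2 : ¬ (y0 :: q') <+: (x2 :: x3 :: rest) := by
        intro hcon; exact hy2 (List.cons_prefix_cons.mp hcon).1
      have hne3 : ¬ (y0 :: q') <+: (x3 :: rest) := by
        intro hcon; exact hy3 (List.cons_prefix_cons.mp hcon).1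
      have hskip : pvR (y0 :: q') ['@'] ([x0,x1,x2,x3] ++ rest)
          = [x0,x1,x2,x3] ++ pvR (y0 :: q') ['@'] rest := by
        simp only [List.cons_append, List.nil_append]
        rw [pvR_neg _ _ _ _ hne0, pvR_neg _ _ _ _ hne1, pvR_neg _ _ _ _ hne2,
            pvR_neg _ _ _ _ hne3]
      rw [pvComp_cons_eq, hskip,
          ih (fun q hmq => hqs q (List.mem_cons_of_mem _ hmq))
             (by cases List.mem_cons.mp hmem with
                 | inl h => exact absurd h.symm hq
                 | inr h => exact h)
             (pvR (y0 :: q') ['@'] rest),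
          pvComp_cons_eq]

-- concrete facts about the pattern tables, checked by computation
theorem pvFacts :
    (∀ p ∈ pvPs8, ∀ q ∈ pvPs8, q.length = 4 ∧ '@' ∉ q ∧
      (q ≠ p → q.head? ≠ p[1]? ∧ q.head? ≠ p[2]? ∧ q.head? ≠ p[3]?)) ∧
    (∀ p ∈ pvPs8, p.length = 4 ∧ p ∈ pvPats ∧
      p.head? ∈ [some '_', some '(', some '[', some '{']) ∧
    (∀ p ∈ pvPats, p ∈ pvPs8 ∧ p.length = 4) := by decide

theorem pvMain_aux : ∀ (n : Nat) (l : List Char), l.length ≤ n →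
    pvR [' '] [] (pvComp pvPs8 l) = pvScan l := by
  intro n
  induction n with
  | zero =>
    intro l hl
    have : l = [] := List.eq_nil_of_length_eq_zero (Nat.le_zero.mp hl)
    subst this
    rw [pvComp_nil, pvR_nil, pvScan]
  | succ n ih =>
    intro l hl
    cases l with
    | nil => rw [pvComp_nil, pvR_nil, pvScan]
    | cons c t =>
      by_cases hm : ∃ pp ∈ pvPs8, pp <+: (c :: t)
      · obtain ⟨pp, hmem, hpre⟩ := hm
        obtain ⟨hpp4, hppat, hpphead⟩ := pvFacts.2.1 pp hmem
        obtain ⟨rest, hrest⟩ := hpre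
        have hcomp : pvComp pvPs8 (pp ++ rest) = '@' :: pvComp pvPs8 rest :=
          pvHM pp hpp4 pvPs8 (pvFacts.1 pp hmem) hmem rest
        have hspace : pvR [' '] [] ('@' :: pvComp pvPs8 rest)
            = '@' :: pvR [' '] [] (pvComp pvPs8 rest) := by
          apply pvR_neg
          intro hcon
          exact absurd (List.cons_prefix_cons.mp hcon).1 (by decide)
        have htake : (c :: t).take 4 = pp := by
          rw [← hrest, ← hpp4]; exact List.take_left
        have hdrop : (c :: t).drop 4 = rest := by
          rw [← hrest, ← hpp4]; exact List.drop_left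
        have hhead : c ∈ ['_','(','[','{'] := by
          have : (c :: t).head? = pp.head? := by
            rw [← hrest]
            cases pp with
            | nil => simp at hpp4
            | cons a b => simp
          simp only [List.head?_cons] at this
          simpa [← this] using hpphead
        have hscan : pvScan (c :: t) = '@' :: pvScan ((c :: t).drop 4) := by
          rw [pvScan]
          simp [hhead, htake, hppat]
        have hlen : rest.length ≤ n := by
          have := congrArg List.length hrest
          simp [hpp4] at this
          simp at hl
          omega
        rw [← hrest, hcomp, hspace, hrest, hscan, hdrop, ih rest hlen]
      · push Not at hm
        have hcomp : pvComp pvPs8 (c :: t) = c :: pvComp pvPs8 t :=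
          pvComp_cons pvPs8 c t hm (fun q hq => (pvFacts.1 q hq q hq).2.1)
        have hnotpat : ¬ (c ∈ ['_','(','[','{'] ∧ (c :: t).take 4 ∈ pvPats) := by
          rintro ⟨_, h2⟩
          obtain ⟨hmem8, _⟩ := pvFacts.2.2 _ h2
          exact hm _ hmem8 (List.take_prefix 4 (c :: t))
        have hlen : t.length ≤ n := by simp at hl; omega
        rw [hcomp, pvScan]
        simp only [hnotpat, if_false]
        by_cases hc : c = ' '
        · subst hc
          have : pvR [' '] [] (' ' :: pvComp pvPs8 t)
              = pvR [' '] [] (pvComp pvPs8 t) := by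
            rw [pvR_pos _ _ _ _ (by simp) (by simp [List.cons_prefix_cons])]
            simp
          rw [this, ih t hlen]
          simp
        · rw [pvR_neg _ _ _ _ (by
            intro hcon
            exact hc ((List.cons_prefix_cons.mp hcon).1).symm), ih t hlen]
          simp [hc]

-- A's nested replaces, written out and rewritten to the pvR/pvComp chain
theorem pvA_toList (text : String) :
    (normalize_email_text_py text).toList = pvR [' '] [] (pvComp pvPs8 text.toList) := by
  simp only [normalize_email_text_py, List.foldl]
  have hu1 : PySem.Str.upper "_AT_" = "_AT_" := rfl
  have hu2 : PySem.Str.upper "(at)" = "(AT)" := rfl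
  have hu3 : PySem.Str.upper "[at]" = "[AT]" := rfl
  have hu4 : PySem.Str.upper "{at}" = "{AT}" := rfl
  rw [hu1, hu2, hu3, hu4]
  simp only [PySem.Str.replace, String.toList_ofList]
  rw [pvReplace_eq _ _ _ (by decide), pvReplace_eq _ _ _ (by decide),
      pvReplace_eq _ _ _ (by decide), pvReplace_eq _ _ _ (by decide),
      pvReplace_eq _ _ _ (by decide), pvReplace_eq _ _ _ (by decide),
      pvReplace_eq _ _ _ (by decide), pvReplace_eq _ _ _ (by decide),
      pvReplace_eq _ _ _ (by decide)]
  rfl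

-- ===== VERDICT (by name: the statement is the Claim_ definition above) =====
theorem normalize_email_text_py_spec : Claim_equal_normalize_email_text_py := by
  intro text _
  unfold Spec_normalize_email_text_py normalize_email_text_py_alt
  apply String.toList_inj.mp
  rw [pvA_toList, String.toList_ofList,
      pvMain_aux (text.toList.length) text.toList (le_refl _)]
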